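-- pv_equiv track=rewrite | github.com/edu20056/Intro_Progra_IIProject | Try.py | Rhomb
-- ===== SOURCE A (Python) =====
-- def Rhomb(matrix, color, full):
--
--     # Calcular el centro de la matriz.
--     center = len(matrix) // 2
--
--     # Verificar si se desea dibujar un rombo completo o solo el borde.
--     if full :
--         for i in range(len(matrix)):
--             for j in range(len(matrix)):
--
--                 # Calcular la distancia manhattan desde el centro.
--                 if abs(center - i) + abs(center - j) <= len(matrix) // 2 - 1 :
--                     matrix[i][j] = color
--     else:
--         for i in range(len(matrix)):
--             for j in range(len(matrix)):
--
--                 # Calcular la distancia manhattan desde el centro.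
--                 if abs(center - i) + abs(center - j) == len(matrix) // 2 - 1 :
--                     matrix[i][j] = color
--
--     return matrix
-- ===== SOURCE B (Python) =====
-- def Rhomb(matrix, color, full):
--     # Per-row interval fill: each row i intersects the diamond in the column
--     # interval [c-d, c+d] where d = (n//2 - 1) - |c - i|; skip rows with d < 0.
--     n = len(matrix)
--     c = n // 2
--     r = c - 1
--     for i, row in enumerate(matrix):
--         d = r - abs(c - i)
--         if d < 0:
--             continue
--         if full:
--             row[c - d : c + d + 1] = [color] * (2 * d + 1)
--         else:
--             row[c - d] = color
--             row[c + d] = color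
--     return matrix
-- ===== Notes on version B (the rewrite author's own statement) =====
-- stated objective: faster
-- what changed: Instead of scanning all n columns of every row and testing the Manhattan-distance predicate per cell, B computes each row's matching column interval [c-d, c+d] in closed form and writes it with one slice assignment (full) or two endpoint assignments (border).
import Mathlib
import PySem

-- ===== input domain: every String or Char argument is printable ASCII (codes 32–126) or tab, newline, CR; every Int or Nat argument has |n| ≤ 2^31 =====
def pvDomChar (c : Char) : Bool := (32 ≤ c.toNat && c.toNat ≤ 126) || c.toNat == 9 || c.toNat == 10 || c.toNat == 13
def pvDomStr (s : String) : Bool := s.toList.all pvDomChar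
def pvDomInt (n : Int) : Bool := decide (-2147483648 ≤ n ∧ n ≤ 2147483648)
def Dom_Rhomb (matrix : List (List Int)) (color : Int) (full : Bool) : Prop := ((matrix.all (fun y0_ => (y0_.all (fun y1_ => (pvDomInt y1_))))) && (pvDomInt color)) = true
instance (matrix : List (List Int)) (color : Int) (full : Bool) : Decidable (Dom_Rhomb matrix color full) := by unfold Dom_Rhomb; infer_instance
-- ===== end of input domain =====

-- B changes the algorithm (per-row closed-form interval instead of an O(n^2) per-cell scan);
-- both Pythons mutate `matrix` in place and return it: the equivalence proved here is about the return value.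

-- ===== PORT A =====
-- literal transliteration of A's nested per-cell scan; matrix[i][j] = color becomes m.set i ((m.getD i []).set j color)
def Rhomb (matrix : List (List Int)) (color : Int) (full : Bool) : List (List Int) :=
  let n := matrix.length
  let center : Int := (n : Int) / 2
  if full then
    (List.range n).foldl (fun m (i : Nat) =>
      (List.range n).foldl (fun m (j : Nat) =>
        if |center - (i : Int)| + |center - (j : Int)| ≤ (n : Int) / 2 - 1 then
          m.set i ((m.getD i []).set j color)
        else m) m) matrix
  else
    (List.range n).foldl (fun m (i : Nat) =>
      (List.range n).foldl (fun m (j : Nat) =>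
        if |center - (i : Int)| + |center - (j : Int)| = (n : Int) / 2 - 1 then
          m.set i ((m.getD i []).set j color)
        else m) m) matrix

-- ===== PORT B =====
-- literal transliteration of Source B: enumerate(matrix) → mapIdx; the slice assignment
-- row[c-d : c+d+1] = [color]*(2*d+1) (0 ≤ c-d ≤ c+d+1 here) → take ++ replicate ++ drop
def Rhomb_alt (matrix : List (List Int)) (color : Int) (full : Bool) : List (List Int) :=
  let n := matrix.length
  let c : Int := (n : Int) / 2
  let r : Int := c - 1
  matrix.mapIdx (fun i row =>
    let d := r - |c - (i : Int)|
    if d < 0 then row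
    else if full then
      row.take (c - d).toNat ++ List.replicate (2 * d + 1).toNat color ++ row.drop (c + d + 1).toNat
    else
      (row.set (c - d).toNat color).set (c + d).toNat color)

-- ===== PRECONDITION & SPEC =====
-- Pre_ excludes exactly the inputs on which the Python A raises IndexError: some row i meets the
-- diamond (d ≥ 0) but is too short to hold the rightmost painted column c + d.
def Pre_Rhomb (matrix : List (List Int)) (color : Int) (full : Bool) : Prop :=
  ∀ i < matrix.length,
    let c : Int := (matrix.length : Int) / 2
    let d : Int := (c - 1) - |c - (i : Int)|
    0 ≤ d → c + d < ((matrix.getD i []).length : Int)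
instance (matrix : List (List Int)) (color : Int) (full : Bool) : Decidable (Pre_Rhomb matrix color full) := by unfold Pre_Rhomb; infer_instance
def pvWitness_Rhomb : List (List Int) × Int × Bool := ([[0,0,0],[0,0,0],[0,0,0]], 7, true)

def Spec_Rhomb (matrix : List (List Int)) (color : Int) (full : Bool) (out : List (List Int)) : Prop := out = Rhomb_alt matrix color full
instance (matrix : List (List Int)) (color : Int) (full : Bool) (out : List (List Int)) : Decidable (Spec_Rhomb matrix color full out) := by unfold Spec_Rhomb; infer_instance

-- ===== CLAIM (what is proved, stated in full; the proofs are below) =====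
def Claim_equal_Rhomb : Prop := ∀ (matrix : List (List Int)) (color : Int) (full : Bool), Dom_Rhomb matrix color full → Pre_Rhomb matrix color full → Spec_Rhomb matrix color full (Rhomb matrix color full)

-- ===== LEMMAS AND PROOFS =====

-- the set-if fold over a row preserves its length
lemma rowStep_length (p : Nat → Prop) [DecidablePred p] (c : Int) (js : List Nat) (row : List Int) :
    (js.foldl (fun r j => if p j then r.set j c else r) row).length = row.length := by
  induction js generalizing row with
  | nil => rfl
  | cons j js ih => simp only [List.foldl_cons]; split_ifs <;> simp [ih]

-- pointwise characterisation of A's inner per-row scan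
lemma rowA_getElem (p : Nat → Prop) [DecidablePred p] (c : Int) (t : Nat) (row : List Int) (k : Nat) :
    ((List.range t).foldl (fun r j => if p j then r.set j c else r) row)[k]?
    = if k < t ∧ p k ∧ k < row.length then some c else row[k]? := by
  induction t with
  | zero => simp
  | succ t ih =>
    rw [List.range_succ, List.foldl_append, List.foldl_cons, List.foldl_nil]
    have hlen := rowStep_length p c (List.range t) row
    by_cases hpt : p t
    · rw [if_pos hpt, List.getElem?_set, hlen]
      by_cases hkt : t = k
      · subst hkt
        by_cases hkl : t < row.length
        · rw [if_pos rfl, if_pos hkl, if_pos ⟨by omega, hpt, hkl⟩]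
        · rw [if_pos rfl, if_neg hkl, if_neg (by tauto), List.getElem?_eq_none (by omega)]
      · rw [if_neg hkt, ih]
        by_cases h1 : k < t ∧ p k ∧ k < row.length
        · rw [if_pos h1, if_pos ⟨by omega, h1.2⟩]
        · rw [if_neg h1, if_neg (fun h2 => h1 ⟨by omega, h2.2⟩)]
    · rw [if_neg hpt, ih]
      by_cases h1 : k < t ∧ p k ∧ k < row.length
      · rw [if_pos h1, if_pos ⟨by omega, h1.2⟩]
      · rw [if_neg h1, if_neg ?_]
        rintro ⟨h2, h3, h4⟩
        refine h1 ⟨?_, h3, h4⟩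
        rcases Nat.lt_succ_iff_lt_or_eq.1 h2 with h | h
        · exact h
        · exact absurd (h ▸ h3) hpt

-- A's inner loop over columns only rewrites row i: pull it out as a row-level fold
lemma innerA (p : Nat → Prop) [DecidablePred p] (c : Int) (i : Nat) (js : List Nat) :
    ∀ (m : List (List Int)), i < m.length →
      js.foldl (fun m j => if p j then m.set i ((m.getD i []).set j c) else m) m
      = m.set i (js.foldl (fun r j => if p j then r.set j c else r) (m.getD i [])) := by
  induction js with
  | nil =>
    intro m hm
    rw [List.foldl_nil, List.foldl_nil, List.getD_eq_getElem _ _ hm, List.set_getElem_self]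
  | cons j js ih =>
    intro m hm
    simp only [List.foldl_cons]
    by_cases h : p j
    · rw [if_pos h, if_pos h, ih _ (by simpa using hm)]
      rw [show (m.set i ((m.getD i []).set j c)).getD i [] = (m.getD i []).set j c by
        rw [List.getD_eq_getElem?_getD, List.getElem?_set_self (by simpa using hm)]; rfl]
      rw [List.set_set]
    · rw [if_neg h, if_neg h, ih m hm]

-- A's outer loop, row by row, is a mapIdx of the row-level fold
lemma outerA (p2 : Nat → Nat → Prop) [inst : ∀ i, DecidablePred (p2 i)] (c : Int) (n : Nat)
    (m : List (List Int)) :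
    ∀ (k : Nat), k ≤ m.length →
      (List.range k).foldl (fun acc i =>
          (List.range n).foldl (fun acc j =>
            if p2 i j then acc.set i ((acc.getD i []).set j c) else acc) acc) m
      = (m.take k).mapIdx (fun i row =>
            (List.range n).foldl (fun r j => if p2 i j then r.set j c else r) row) ++ m.drop k := by
  intro k
  induction k with
  | zero => intro _; simp
  | succ k ih =>
    intro hk1
    have hk : k < m.length := by omega
    rw [List.range_succ, List.foldl_append, List.foldl_cons, List.foldl_nil, ih (by omega)]
    set g : Nat → List Int → List Int :=
      fun i row => (List.range n).foldl (fun r j => if p2 i j then r.set j c else r) row with hg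
    set G : List (List Int) := List.mapIdx g (List.take k m) with hG
    have hlenA : G.length = k := by
      rw [hG]; simp; omega
    have hin := innerA (p2 k) c k (List.range n) (G ++ List.drop k m)
      (by simp [hlenA]; omega)
    rw [hin]
    have hget : (G ++ List.drop k m).getD k [] = m[k] := by
      rw [List.getD_eq_getElem?_getD, List.getElem?_append_right (by omega), hlenA,
        Nat.sub_self, List.getElem?_drop, Nat.add_zero, List.getElem?_eq_getElem hk]
      rfl
    rw [hget, List.drop_eq_getElem_cons hk, List.set_append, if_neg (by rw [hlenA]; omega),
      hlenA, Nat.sub_self, List.set_cons_zero, List.take_add_one, List.getElem?_eq_getElem hk]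
    have htk : (List.take k m).length = k := by simp; omega
    simp only [Option.toList_some, List.mapIdx_append, htk, hG, hg]
    simp [List.append_assoc]

-- row-level equality, full diamond: A's per-cell scan of row k = B's slice fill
lemma row_full (n k : Nat) (color : Int) (row : List Int) (c d : Int)
    (hc : c = (n : Int) / 2) (hd : d = (c - 1) - |c - (k : Int)|)
    (hlen : 0 ≤ d → c + d < (row.length : Int)) :
    (List.range n).foldl
      (fun r (j : Nat) => if |c - (k : Int)| + |c - (j : Int)| ≤ c - 1 then r.set j color else r) row
    = if d < 0 then row
      else row.take (c - d).toNat ++ List.replicate (2 * d + 1).toNat color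
        ++ row.drop (c + d + 1).toNat := by
  have hak : 0 ≤ |c - (k : Int)| := abs_nonneg _
  by_cases hdneg : d < 0
  · rw [if_pos hdneg]
    apply List.ext_getElem?
    intro q
    rw [rowA_getElem, if_neg]
    rintro ⟨_, h3, _⟩
    have haq : 0 ≤ |c - (q : Int)| := abs_nonneg _
    omega
  · rw [if_neg hdneg, List.append_assoc]
    have hL := hlen (by omega)
    apply List.ext_getElem?
    intro q
    rw [rowA_getElem]
    have hlt : (List.take (c - d).toNat row).length = (c - d).toNat := by
      simp; omega
    by_cases h1 : q < (c - d).toNat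
    · rw [List.getElem?_append_left (by omega), List.getElem?_take, if_pos h1, if_neg]
      rintro ⟨_, h3, _⟩
      have h5 := le_abs_self (c - (q : Int))
      omega
    · rw [List.getElem?_append_right (by omega), hlt]
      by_cases h2 : q - (c - d).toNat < (2 * d + 1).toNat
      · rw [List.getElem?_append_left (by simp [List.length_replicate]; omega),
          List.getElem?_replicate, if_pos h2, if_pos]
        have haq : |c - (q : Int)| ≤ d := abs_le.mpr ⟨by omega, by omega⟩
        exact ⟨by omega, by omega, by omega⟩
      · rw [List.getElem?_append_right (by simp [List.length_replicate]; omega),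
          List.length_replicate, List.getElem?_drop]
        have hidx : (c + d + 1).toNat + (q - (c - d).toNat - (2 * d + 1).toNat) = q := by omega
        rw [hidx, if_neg]
        rintro ⟨_, h3, _⟩
        have h5 := neg_abs_le (c - (q : Int))
        omega

-- row-level equality, border: A's per-cell scan of row k = B's two endpoint writes
lemma row_border (n k : Nat) (color : Int) (row : List Int) (c d : Int)
    (hc : c = (n : Int) / 2) (hd : d = (c - 1) - |c - (k : Int)|) (hk : k < n)
    (hlen : 0 ≤ d → c + d < (row.length : Int)) :
    (List.range n).foldl
      (fun r (j : Nat) => if |c - (k : Int)| + |c - (j : Int)| = c - 1 then r.set j color else r) row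
    = if d < 0 then row
      else (row.set (c - d).toNat color).set (c + d).toNat color := by
  have hak : 0 ≤ |c - (k : Int)| := abs_nonneg _
  by_cases hdneg : d < 0
  · rw [if_pos hdneg]
    apply List.ext_getElem?
    intro q
    rw [rowA_getElem, if_neg]
    rintro ⟨_, h3, _⟩
    have haq : 0 ≤ |c - (q : Int)| := abs_nonneg _
    omega
  · rw [if_neg hdneg]
    have hL := hlen (by omega)
    apply List.ext_getElem?
    intro q
    rw [rowA_getElem, List.getElem?_set, List.getElem?_set, List.length_set]
    by_cases hqb : (c + d).toNat = q
    · have hcq : c - (q : Int) = -d := by omega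
      have haq : |c - (q : Int)| = d := by rw [hcq, abs_neg, abs_of_nonneg (by omega)]
      rw [if_pos hqb, if_pos (by omega), if_pos (by omega)]
    · rw [if_neg hqb]
      by_cases hqa : (c - d).toNat = q
      · have hcq : c - (q : Int) = d := by omega
        have haq : |c - (q : Int)| = d := by rw [hcq, abs_of_nonneg (by omega)]
        rw [if_pos hqa, if_pos (by omega), if_pos (by omega)]
      · rw [if_neg hqa, if_neg]
        rintro ⟨_, h3, _⟩
        have haq : |c - (q : Int)| = d := by omega
        rcases (abs_eq (by omega : (0:Int) ≤ d)).1 haq with h | h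
        · exact hqa (by omega)
        · exact hqb (by omega)

-- ===== VERDICT (by name: the statement is the Claim_ definition above) =====
theorem Rhomb_spec : Claim_equal_Rhomb := by
  intro matrix color full _dom hpre
  unfold Spec_Rhomb Rhomb Rhomb_alt
  cases full
  all_goals simp only [Bool.false_eq_true, if_false, if_true]
  · -- full = false (border)
    have h := outerA
      (fun i j => |(matrix.length : Int) / 2 - (i : Int)| + |(matrix.length : Int) / 2 - (j : Int)| = (matrix.length : Int) / 2 - 1)
      color matrix.length matrix matrix.length le_rfl
    simp only [] at h
    rw [h, List.take_length, List.drop_length, List.append_nil]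
    apply List.ext_getElem?
    intro i
    rw [List.getElem?_mapIdx, List.getElem?_mapIdx]
    cases hrow : matrix[i]? with
    | none => rfl
    | some row =>
      have hi : i < matrix.length := by
        by_contra hcon
        rw [List.getElem?_eq_none (by omega)] at hrow
        cases hrow
      have hpre' := hpre i hi
      simp only [] at hpre'
      have hgd : matrix.getD i [] = row := by
        rw [List.getD_eq_getElem?_getD, hrow]
        rfl
      rw [hgd] at hpre'
      simp only [Option.map_some, Option.some_inj]
      exact row_border matrix.length i color row _ _ rfl rfl hi hpre'
  · -- full = true
    have h := outerA
      (fun i j => |(matrix.length : Int) / 2 - (i : Int)| + |(matrix.length : Int) / 2 - (j : Int)| ≤ (matrix.length : Int) / 2 - 1)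
      color matrix.length matrix matrix.length le_rfl
    simp only [] at h
    rw [h, List.take_length, List.drop_length, List.append_nil]
    apply List.ext_getElem?
    intro i
    rw [List.getElem?_mapIdx, List.getElem?_mapIdx]
    cases hrow : matrix[i]? with
    | none => rfl
    | some row =>
      have hi : i < matrix.length := by
        by_contra hcon
        rw [List.getElem?_eq_none (by omega)] at hrow
        cases hrow
      have hpre' := hpre i hi
      simp only [] at hpre'
      have hgd : matrix.getD i [] = row := by
        rw [List.getD_eq_getElem?_getD, hrow]
        rfl
      rw [hgd] at hpre'
      simp only [Option.map_some, Option.some_inj]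
      exact row_full matrix.length i color row _ _ rfl rfl hpre'
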